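-- pv_equiv track=rewrite | github.com/tubone24/AP2_demo_app | ap2_types.py | get_compatible_version
-- ===== SOURCE A (Python) =====
-- from typing import Optional, List, Dict, Any, Literal
--
-- SUPPORTED_AP2_VERSIONS = ["0.1", "0.2", "1.0"]
--
-- def get_compatible_version(requested_version: str, available_versions: Optional[List[str]] = None) -> Optional[str]:
--     """
--     互換性のあるバージョンを取得
--
--     Args:
--         requested_version: リクエストされたバージョン
--         available_versions: 利用可能なバージョンのリスト（Noneの場合はSUPPORTED_AP2_VERSIONSを使用）
--
--     Returns:
--         Optional[str]: 互換性のあるバージョン（見つからない場合はNone）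
--     """
--     if available_versions is None:
--         available_versions = SUPPORTED_AP2_VERSIONS
--
--     # 完全一致を優先
--     if requested_version in available_versions:
--         return requested_version
--
--     # メジャーバージョンが一致する最新バージョンを探す
--     try:
--         requested_major = requested_version.split('.')[0]
--         compatible_versions = [
--             v for v in available_versions
--             if v.split('.')[0] == requested_major
--         ]
--
--         if compatible_versions:
--             # バージョン番号でソート（降順）して最新を返す
--             return sorted(compatible_versions, reverse=True)[0]
--
--     except (IndexError, ValueError):
--         pass
--
--     return None
-- ===== SOURCE B (Python) =====
-- # B: single pass with a running maximum instead of membership test + filter + sort.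
-- from typing import Optional, List
--
-- SUPPORTED_AP2_VERSIONS = ["0.1", "0.2", "1.0"]
--
-- def get_compatible_version(requested_version: str, available_versions: Optional[List[str]] = None) -> Optional[str]:
--     versions = SUPPORTED_AP2_VERSIONS if available_versions is None else available_versions
--     requested_major = requested_version.split('.')[0]
--     best = None
--     for v in versions:
--         if v == requested_version:
--             return requested_version
--         if v.split('.')[0] == requested_major and (best is None or v > best):
--             best = v
--     return best
-- ===== Notes on version B (the rewrite author's own statement) =====
-- stated objective: alternative
-- what changed: Replaced A's three traversals (membership test, filtered comprehension, descending sort of the matches) by one loop that early-returns on an exact match and keeps a running lexicographic maximum of same-major versions; it trades the sort for a single pass, but CPython's C-level sort makes the wall-clock cost comparable.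
import Mathlib
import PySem

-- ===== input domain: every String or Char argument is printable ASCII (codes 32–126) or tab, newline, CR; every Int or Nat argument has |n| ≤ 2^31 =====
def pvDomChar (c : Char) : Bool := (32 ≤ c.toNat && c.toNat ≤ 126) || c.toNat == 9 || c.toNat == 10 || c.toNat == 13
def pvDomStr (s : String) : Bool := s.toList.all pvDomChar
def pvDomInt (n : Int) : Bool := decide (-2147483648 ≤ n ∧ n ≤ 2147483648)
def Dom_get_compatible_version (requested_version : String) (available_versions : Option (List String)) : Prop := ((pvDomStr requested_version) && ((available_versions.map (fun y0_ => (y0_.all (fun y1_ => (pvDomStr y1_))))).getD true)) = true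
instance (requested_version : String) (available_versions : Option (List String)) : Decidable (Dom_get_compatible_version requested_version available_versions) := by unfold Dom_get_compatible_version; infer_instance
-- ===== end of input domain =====

-- B replaces A's three passes (membership test, filter comprehension, descending sort)
-- by one loop with an early exact-match return and a running lexicographic maximum.

def SUPPORTED_AP2_VERSIONS : List String := ["0.1", "0.2", "1.0"]

-- s.split('.') — the separator "." is nonempty, so PySem.Str.split? always returns some
def splitDot (s : String) : List String := (PySem.Str.split? s ".").getD []

-- ===== PORT A =====
def get_compatible_version (requested_version : String) (available_versions : Option (List String)) : Option String :=
  let av := match available_versions with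
    | none => SUPPORTED_AP2_VERSIONS
    | some l => l
  if av.contains requested_version then some requested_version
  else
    -- try: requested_version.split('.')[0]; an IndexError is caught and falls through to None
    match PySem.List.pyGet? (splitDot requested_version) 0 with
    | none => none
    | some requested_major =>
      let compatible_versions := av.filter
        (fun v => PySem.List.pyGet? (splitDot v) 0 == some requested_major)
      if compatible_versions.isEmpty then none
      else PySem.List.pyGet? (PySem.List.sorted compatible_versions (fun x => x) true) 0

-- ===== PORT B =====
-- the for-loop of Source B: early return on exact match, running maximum 'best'
def altLoop (requested_version requested_major : String) :
    List String → Option String → Option String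
  | [], best => best
  | v :: rest, best =>
    if v == requested_version then some requested_version
    else if ((splitDot v).headD "" == requested_major)
            && (best.elim true (fun b => decide (b < v))) then
      altLoop requested_version requested_major rest (some v)
    else
      altLoop requested_version requested_major rest best

def get_compatible_version_alt (requested_version : String) (available_versions : Option (List String)) : Option String :=
  let versions := match available_versions with
    | none => SUPPORTED_AP2_VERSIONS
    | some l => l
  -- requested_version.split('.')[0]: split('.') is never empty, so [0] is its head
  let requested_major := (splitDot requested_version).headD ""
  altLoop requested_version requested_major versions none

-- ===== PRECONDITION & SPEC =====
def Spec_get_compatible_version (requested_version : String) (available_versions : Option (List String)) (out : Option String) : Prop := out = get_compatible_version_alt requested_version available_versions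
instance (requested_version : String) (available_versions : Option (List String)) (out : Option String) : Decidable (Spec_get_compatible_version requested_version available_versions out) := by unfold Spec_get_compatible_version; infer_instance

-- ===== CLAIM (what is proved, stated in full; the proofs are below) =====
def Claim_equal_get_compatible_version : Prop := ∀ (requested_version : String) (available_versions : Option (List String)), Dom_get_compatible_version requested_version available_versions → Spec_get_compatible_version requested_version available_versions (get_compatible_version requested_version available_versions)

-- ===== LEMMAS AND PROOFS =====

-- the accumulator step of B's loop, restricted to the order condition (proof-only helper)
def stepMax (b : Option String) (v : String) : Option String :=
  if b.elim true (fun x => decide (x < v)) then some v else b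

theorem splitOn_go_ne_nil (sep : List Char) :
    ∀ fuel l cur acc, PySem.Chars.splitOn.go sep fuel l cur acc ≠ [] := by
  intro fuel
  induction fuel with
  | zero => intro l cur acc; simp [PySem.Chars.splitOn.go]
  | succ n ih =>
    intro l cur acc
    match l with
    | [] => simp [PySem.Chars.splitOn.go]
    | c :: rest =>
      rw [PySem.Chars.splitOn.go]
      split
      · exact ih _ _ _
      · exact ih _ _ _

theorem splitDot_ne_nil (s : String) : splitDot s ≠ [] := by
  unfold splitDot
  simp [PySem.Str.split?, PySem.Chars.split?, PySem.Chars.splitOn]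
  exact splitOn_go_ne_nil _ _ _ _ _

theorem pyGet?_zero_of_ne_nil {l : List String} (h : l ≠ []) :
    PySem.List.pyGet? l 0 = some (l.headD "") := by
  cases l with
  | nil => exact absurd rfl h
  | cons x xs => simp

theorem stepMax_some (b v : String) : stepMax (some b) v = some (max b v) := by
  unfold stepMax
  by_cases h : v ≤ b
  · simp [Option.elim, not_lt.mpr h, h]
  · simp [Option.elim, lt_of_not_ge h, max_def', h]

theorem foldl_max_mem (l : List String) (b : String) : l.foldl max b ∈ b :: l := by
  induction l generalizing b with
  | nil => simp
  | cons x r ih =>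
    rw [List.foldl_cons]
    rcases max_choice b x with hm | hm <;> rw [hm]
    · rcases List.mem_cons.mp (ih b) with h | h
      · simp [h]
      · simp [List.mem_cons.mpr (Or.inr h)]
    · rcases List.mem_cons.mp (ih x) with h | h
      · simp [h]
      · simp [List.mem_cons.mpr (Or.inr h)]

theorem foldMax_some (l : List String) (b : String) :
    l.foldl stepMax (some b) = some (l.foldl max b) := by
  induction l generalizing b with
  | nil => rfl
  | cons x r ih => simp [List.foldl, stepMax_some, ih]

-- B's loop = "exact match, else running max over the same-major filter"
theorem altLoop_eq (rv m : String) (l : List String) (best : Option String) :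
    altLoop rv m l best =
      if l.contains rv then some rv
      else (l.filter (fun v => (splitDot v).headD "" == m)).foldl stepMax best := by
  induction l generalizing best with
  | nil => simp [altLoop]
  | cons v rest ih =>
    rw [altLoop]
    by_cases hveq : v = rv
    · subst hveq; simp
    · have hv : (v == rv) = false := beq_eq_false_iff_ne.mpr hveq
      rw [if_neg (by simp [hv])]
      have hcc : (v :: rest).contains rv = rest.contains rv := by
        simp [Ne.symm hveq]
      rw [hcc, List.filter_cons]
      by_cases hp : ((splitDot v).headD "" == m) = true
      · rw [if_pos hp]
        simp only [hp, Bool.true_and]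
        have hstep : (if (best.elim true fun b => decide (b < v)) = true then
            altLoop rv m rest (some v) else altLoop rv m rest best)
            = altLoop rv m rest (stepMax best v) := by
          unfold stepMax; split <;> rfl
        rw [hstep, ih, List.foldl_cons]
      · rw [if_neg hp]
        simp only [hp, Bool.false_and, if_neg (Bool.false_ne_true)]
        exact ih best

-- head of the descending sort = running maximum, on a nonempty list
theorem sorted_head_eq_foldMax (c : List String) (hne : c ≠ []) :
    PySem.List.pyGet? (PySem.List.sorted c (fun x => x) true) 0 =
      c.foldl stepMax none := by
  obtain ⟨m, t, hs⟩ : ∃ m t, PySem.List.sorted c (fun x => x) true = m :: t := by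
    cases h : PySem.List.sorted c (fun x => x) true with
    | nil => exact absurd ((PySem.List.sorted_eq_nil_iff c _ true).mp h) hne
    | cons a b => exact ⟨a, b, rfl⟩
  have hmem : m ∈ c := by
    have : m ∈ PySem.List.sorted c (fun x => x) true := by simp [hs]
    exact (PySem.List.mem_sorted c _ true m).mp this
  have hmax : ∀ y ∈ c, y ≤ m := PySem.List.key_head_sorted_rev_ge c (fun x => x) hs
  cases c with
  | nil => exact absurd rfl hne
  | cons v r =>
    have hstep : (v :: r).foldl stepMax none = some (r.foldl max v) := by
      simp [List.foldl, stepMax, Option.elim, foldMax_some]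
    rw [hs, PySem.List.pyGet?_zero_cons, hstep]
    have hfm : r.foldl max v ∈ v :: r := foldl_max_mem r v
    have h1 : r.foldl max v ≤ m := hmax _ hfm
    have h2 : m ≤ r.foldl max v := by
      rcases List.mem_cons.mp hmem with h | h
      · exact h ▸ (PySem.List.le_foldl_max r v).1
      · exact (PySem.List.le_foldl_max r v).2 m h
    exact congrArg some (le_antisymm h1 h2).symm

-- the equivalence on the concrete version list (after the None default)
theorem main_list (rv : String) (av : List String) :
    (if av.contains rv then some rv
     else match PySem.List.pyGet? (splitDot rv) 0 with
       | none => none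
       | some requested_major =>
         let compatible_versions := av.filter
           (fun v => PySem.List.pyGet? (splitDot v) 0 == some requested_major)
         if compatible_versions.isEmpty then none
         else PySem.List.pyGet? (PySem.List.sorted compatible_versions (fun x => x) true) 0)
    = altLoop rv ((splitDot rv).headD "") av none := by
  rw [altLoop_eq, pyGet?_zero_of_ne_nil (splitDot_ne_nil rv)]
  by_cases hc : av.contains rv = true
  · rw [if_pos hc, if_pos hc]
  · rw [if_neg hc, if_neg hc]
    show (let compatible_versions := av.filter
            (fun v => PySem.List.pyGet? (splitDot v) 0 == some ((splitDot rv).headD ""));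
          if compatible_versions.isEmpty then none
          else PySem.List.pyGet? (PySem.List.sorted compatible_versions (fun x => x) true) 0) = _
    have hfilter : av.filter
        (fun v => PySem.List.pyGet? (splitDot v) 0 == some ((splitDot rv).headD "")) =
        av.filter (fun v => (splitDot v).headD "" == (splitDot rv).headD "") := by
      apply List.filter_congr
      intro v _
      rw [pyGet?_zero_of_ne_nil (splitDot_ne_nil v)]
      simp
    simp only [hfilter]
    by_cases he : (av.filter (fun v => (splitDot v).headD "" == (splitDot rv).headD "")).isEmpty
    · rw [if_pos he, List.isEmpty_iff.mp he]
      rfl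
    · rw [if_neg he]
      exact sorted_head_eq_foldMax _ (by simpa [List.isEmpty_iff] using he)

-- ===== VERDICT (by name: the statement is the Claim_ definition above) =====
theorem get_compatible_version_spec : Claim_equal_get_compatible_version := by
  intro rv avs _
  unfold Spec_get_compatible_version get_compatible_version get_compatible_version_alt
  cases avs with
  | none => exact main_list rv SUPPORTED_AP2_VERSIONS
  | some l => exact main_list rv l
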